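-- pv_equiv track=rewrite | github.com/zorglub-champignac/PI_EULER | P153.py | SigmaInvInt
-- ===== SOURCE A (Python) =====
-- def SigmaInvInt(nb):
--     Inb0=nb
--     S=0
--     i=1
--     while i<Inb0:
--         Inb1 = nb // (i+1)
--         S += Inb0 * i + i * (Inb1+1+Inb0)*(Inb0-Inb1) // 2
--         Inb0=Inb1
--         i += 1
--     if i == Inb0:
--         S += i * Inb0
--     return S
-- ===== SOURCE B (Python) =====
-- def SigmaInvInt(nb):
--     # hyperbola method: sum_{d=1}^{nb} d*(nb//d) = sum_{ab<=nb} a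
--     #   = sum_{a<=r} a*(nb//a) + sum_{b<=r} T(nb//b) - r*T(r),  r = isqrt(nb)
--     def T(x):
--         return x * (x + 1) // 2
--     S = 0
--     a = 0
--     while (a + 1) * (a + 1) <= nb:
--         a += 1
--         q = nb // a
--         S += a * q + T(q)
--     return S - a * T(a)
-- ===== Notes on version B (the rewrite author's own statement) =====
-- stated objective: alternative
-- what changed: B computes the same sum S = sum_{d<=nb} d*(nb//d) by the symmetric hyperbola method (one loop a = 1..isqrt(nb) accumulating a*(nb//a) + T(nb//a), then subtracting r*T(r)), instead of A's quotient-block walk with running quotients Inb0/Inb1, per-block Gauss sums and a post-loop corner term.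
import Mathlib
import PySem

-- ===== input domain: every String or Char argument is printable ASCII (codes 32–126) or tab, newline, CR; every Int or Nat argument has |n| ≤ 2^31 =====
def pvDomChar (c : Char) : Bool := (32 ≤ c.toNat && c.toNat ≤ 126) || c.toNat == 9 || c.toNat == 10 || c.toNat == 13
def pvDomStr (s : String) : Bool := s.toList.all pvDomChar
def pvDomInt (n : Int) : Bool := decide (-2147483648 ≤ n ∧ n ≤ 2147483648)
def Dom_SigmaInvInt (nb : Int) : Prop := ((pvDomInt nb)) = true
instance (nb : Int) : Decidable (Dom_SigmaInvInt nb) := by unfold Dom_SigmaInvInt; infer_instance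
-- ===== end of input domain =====

-- B computes the same sum by the symmetric hyperbola method (loop to isqrt(nb) with triangular numbers); alternative algorithm, same cost.

-- ===== PORT A =====
-- while-loop of A as fuelled recursion over the same state (Inb0, S, i); fuel nb.toNat+1 is
-- enough because the loop runs only while i < nb // i (proved in the lemmas below).
def SigmaInvIntLoop (fuel : Nat) (nb Inb0 S i : Int) : Int × Int × Int :=
  match fuel with
  | 0 => (Inb0, S, i)
  | fuel + 1 =>
    if i < Inb0 then
      let Inb1 := PySem.Int.floordiv nb (i + 1)
      let S' := S + (Inb0 * i + PySem.Int.floordiv (i * (Inb1 + 1 + Inb0) * (Inb0 - Inb1)) 2)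
      SigmaInvIntLoop fuel nb Inb1 S' (i + 1)
    else (Inb0, S, i)

-- the 'if i == Inb0' after the while-loop
def SigmaInvIntFinish (t : Int × Int × Int) : Int :=
  if t.2.2 = t.1 then t.2.1 + t.2.2 * t.1 else t.2.1

def SigmaInvInt (nb : Int) : Int :=
  SigmaInvIntFinish (SigmaInvIntLoop (nb.toNat + 1) nb nb 0 1)

-- ===== PORT B =====
-- T(x) = x*(x+1)//2
def SigmaInvIntAltT (x : Int) : Int := PySem.Int.floordiv (x * (x + 1)) 2

-- while-loop of B as fuelled recursion over the state (S, a); fuel nb.toNat+1 is enough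
-- because the loop runs only while (a+1)^2 <= nb (proved in the lemmas below).
def SigmaInvIntAltLoop (fuel : Nat) (nb S a : Int) : Int × Int :=
  match fuel with
  | 0 => (S, a)
  | fuel + 1 =>
    if (a + 1) * (a + 1) ≤ nb then
      let a' := a + 1
      let q := PySem.Int.floordiv nb a'
      SigmaInvIntAltLoop fuel nb (S + (a' * q + SigmaInvIntAltT q)) a'
    else (S, a)

def SigmaInvInt_alt (nb : Int) : Int :=
  let t := SigmaInvIntAltLoop (nb.toNat + 1) nb 0 0
  t.1 - t.2 * SigmaInvIntAltT t.2

-- ===== PRECONDITION & SPEC =====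
def Spec_SigmaInvInt (nb : Int) (out : Int) : Prop := out = SigmaInvInt_alt nb
instance (nb : Int) (out : Int) : Decidable (Spec_SigmaInvInt nb out) := by unfold Spec_SigmaInvInt; infer_instance

-- ===== CLAIM (what is proved, stated in full; the proofs are below) =====
def Claim_equal_SigmaInvInt : Prop := ∀ (nb : Int), Dom_SigmaInvInt nb → Spec_SigmaInvInt nb (SigmaInvInt nb)

-- ===== LEMMAS AND PROOFS =====

-- the summand d * (nb // d)
def pvF (nb d : Int) : Int := d * PySem.Int.floordiv nb d

-- sum of d * (nb // d) for d in [lo, hi]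
def pvT (nb lo hi : Int) : Int := ((PySem.List.pyRange lo (hi + 1) 1).map (pvF nb)).sum


-- Gauss: twice the sum of d over [a, a+n) is n*(2a+n-1)
lemma pvGauss (n : Nat) (a : Int) :
    ((PySem.List.pyRange a (a + n) 1).map (fun d => d)).sum * 2 = n * (2 * a + n - 1) := by
  induction n with
  | zero => simp [PySem.List.pyRange_one_eq_nil]
  | succ m ih =>
    have h : a + (m + 1 : Nat) = (a + m) + 1 := by push_cast; ring
    rw [h, PySem.List.pyRange_one_succ_right (by omega)]
    simp only [List.map_append, List.sum_append, List.map_cons, List.map_nil, List.sum_cons,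
      List.sum_nil]
    push_cast
    nlinarith [ih]

-- on the block (nb//(i+1), nb//i] the quotient nb // d equals i
lemma pvBlockQuot (nb i d : Int) (hnb : 0 ≤ nb) (hi : 0 < i)
    (h1 : PySem.Int.floordiv nb (i + 1) < d) (h2 : d ≤ PySem.Int.floordiv nb i) :
    PySem.Int.floordiv nb d = i := by
  have hd0 : 0 ≤ PySem.Int.floordiv nb (i + 1) :=
    (PySem.Int.le_floordiv_iff_mul_le (by omega)).mpr (by omega)
  have hd : 0 < d := by omega
  have hmul : d * i ≤ nb := (PySem.Int.le_floordiv_iff_mul_le hi).mp h2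
  have hlo : i ≤ PySem.Int.floordiv nb d :=
    (PySem.Int.le_floordiv_iff_mul_le hd).mpr (by nlinarith)
  have hub : nb < d * (i + 1) := (PySem.Int.floordiv_lt_iff_lt_mul (by omega)).mp h1
  have hhi : PySem.Int.floordiv nb d < i + 1 :=
    (PySem.Int.floordiv_lt_iff_lt_mul hd).mpr (by nlinarith)
  omega

-- floordiv of nb is antitone in a positive divisor
lemma pvQuotAntitone (nb i : Int) (hnb : 0 ≤ nb) (hi : 0 < i) :
    PySem.Int.floordiv nb (i + 1) ≤ PySem.Int.floordiv nb i := by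
  have h1 : PySem.Int.floordiv nb (i + 1) * (i + 1) ≤ nb :=
    (PySem.Int.le_floordiv_iff_mul_le (by omega)).mp le_rfl
  have h0 : 0 ≤ PySem.Int.floordiv nb (i + 1) :=
    (PySem.Int.le_floordiv_iff_mul_le (by omega)).mpr (by omega)
  exact (PySem.Int.le_floordiv_iff_mul_le hi).mpr (by nlinarith)

-- main loop invariant: starting at index i with Inb0 = nb // i, the loop plus the
-- post-loop корrection computes S plus the sum of d*(nb//d) over d in [i, nb//i]
lemma pvLoopA (nb : Int) (hnb : 1 ≤ nb) :
    ∀ (fuel : Nat) (i S : Int), 1 ≤ i → (i - 1) * i ≤ nb →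
      (PySem.Int.floordiv nb i - i).toNat < fuel →
      SigmaInvIntFinish (SigmaInvIntLoop fuel nb (PySem.Int.floordiv nb i) S i)
        = S + pvT nb i (PySem.Int.floordiv nb i) := by
  intro fuel
  induction fuel with
  | zero => intro i S _ _ hf; omega
  | succ m ih =>
    intro i S hi hprev hf
    by_cases hgd : i < PySem.Int.floordiv nb i
    · -- one loop iteration; write a := nb//(i+1), b := nb//i
      have hi0 : (0:Int) < i := by omega
      have hib : i + 1 ≤ PySem.Int.floordiv nb i := by omega
      have hmul : (i + 1) * i ≤ nb := (PySem.Int.le_floordiv_iff_mul_le hi0).mp hib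
      have hia : i ≤ PySem.Int.floordiv nb (i + 1) :=
        (PySem.Int.le_floordiv_iff_mul_le (by omega)).mpr (by nlinarith)
      have hab : PySem.Int.floordiv nb (i + 1) ≤ PySem.Int.floordiv nb i :=
        pvQuotAntitone nb i (by omega) hi0
      have hfuel : (PySem.Int.floordiv nb (i + 1) - (i + 1)).toNat < m := by omega
      have hstep : SigmaInvIntLoop (m + 1) nb (PySem.Int.floordiv nb i) S i
          = SigmaInvIntLoop m nb (PySem.Int.floordiv nb (i + 1))
              (S + (PySem.Int.floordiv nb i * i
                + PySem.Int.floordiv (i * (PySem.Int.floordiv nb (i + 1) + 1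
                    + PySem.Int.floordiv nb i)
                    * (PySem.Int.floordiv nb i - PySem.Int.floordiv nb (i + 1))) 2)) (i + 1) := by
        simp only [SigmaInvIntLoop, if_pos hgd]
      rw [hstep, ih (i + 1) _ (by omega) (by nlinarith) hfuel]
      -- sum bookkeeping: [i, b] = [i] ++ [i+1, a] ++ (a, b]
      have hsplit : PySem.List.pyRange i (PySem.Int.floordiv nb i + 1) 1
          = PySem.List.pyRange i (i + 1) 1
              ++ (PySem.List.pyRange (i + 1) (PySem.Int.floordiv nb (i + 1) + 1) 1
              ++ PySem.List.pyRange (PySem.Int.floordiv nb (i + 1) + 1)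
                  (PySem.Int.floordiv nb i + 1) 1) := by
        rw [← PySem.List.pyRange_one_append (i + 1) (PySem.Int.floordiv nb (i + 1) + 1)
              (PySem.Int.floordiv nb i + 1) (by omega) (by omega),
            ← PySem.List.pyRange_one_append i (i + 1)
              (PySem.Int.floordiv nb i + 1) (by omega) (by omega)]
      have hblock : (PySem.List.pyRange (PySem.Int.floordiv nb (i + 1) + 1)
              (PySem.Int.floordiv nb i + 1) 1).map (pvF nb)
          = (PySem.List.pyRange (PySem.Int.floordiv nb (i + 1) + 1)
              (PySem.Int.floordiv nb i + 1) 1).map (fun d => d * i) := by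
        apply List.map_congr_left
        intro d hd
        rw [PySem.List.mem_pyRange_one] at hd
        unfold pvF
        rw [pvBlockQuot nb i d (by omega) hi0 (by omega) (by omega)]
      have hgauss : ((PySem.List.pyRange (PySem.Int.floordiv nb (i + 1) + 1)
              (PySem.Int.floordiv nb i + 1) 1).map (fun d => d)).sum * 2
          = (PySem.Int.floordiv nb i - PySem.Int.floordiv nb (i + 1))
              * (PySem.Int.floordiv nb (i + 1) + 1 + PySem.Int.floordiv nb i) := by
        have hcast : PySem.Int.floordiv nb i + 1 = (PySem.Int.floordiv nb (i + 1) + 1)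
            + ((PySem.Int.floordiv nb i - PySem.Int.floordiv nb (i + 1)).toNat : Int) := by omega
        have hg := pvGauss (PySem.Int.floordiv nb i - PySem.Int.floordiv nb (i + 1)).toNat
          (PySem.Int.floordiv nb (i + 1) + 1)
        rw [← hcast] at hg
        rw [hg]
        have : ((PySem.Int.floordiv nb i - PySem.Int.floordiv nb (i + 1)).toNat : Int)
            = PySem.Int.floordiv nb i - PySem.Int.floordiv nb (i + 1) := by omega
        rw [this]; ring
      have hconst : ((PySem.List.pyRange (PySem.Int.floordiv nb (i + 1) + 1)
              (PySem.Int.floordiv nb i + 1) 1).map (fun d => d * i)).sum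
          = ((PySem.List.pyRange (PySem.Int.floordiv nb (i + 1) + 1)
              (PySem.Int.floordiv nb i + 1) 1).map (fun d => d)).sum * i := by
        rw [← List.sum_map_mul_right]
      have hdiv : PySem.Int.floordiv (i * (PySem.Int.floordiv nb (i + 1) + 1
              + PySem.Int.floordiv nb i)
              * (PySem.Int.floordiv nb i - PySem.Int.floordiv nb (i + 1))) 2
          = ((PySem.List.pyRange (PySem.Int.floordiv nb (i + 1) + 1)
              (PySem.Int.floordiv nb i + 1) 1).map (fun d => d)).sum * i := by
        rw [PySem.Int.floordiv_eq_iff_of_pos (by omega)]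
        constructor <;> nlinarith [hgauss]
      unfold pvT
      rw [hsplit]
      simp only [List.map_append, List.sum_append, hblock, hconst, hdiv,
        PySem.List.pyRange_one_singleton, List.map_cons, List.map_nil, List.sum_cons, List.sum_nil]
      unfold pvF
      ring
    · -- loop exits immediately
      have hstop : SigmaInvIntLoop (m + 1) nb (PySem.Int.floordiv nb i) S i
          = (PySem.Int.floordiv nb i, S, i) := by
        simp only [SigmaInvIntLoop, if_neg hgd]
      rw [hstop]
      unfold SigmaInvIntFinish pvT
      by_cases heq : i = PySem.Int.floordiv nb i
      · rw [if_pos heq, show PySem.Int.floordiv nb i + 1 = i + 1 from by omega,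
            PySem.List.pyRange_one_singleton]
        simp only [List.map_cons, List.map_nil, List.sum_cons, List.sum_nil]
        unfold pvF
        rw [← heq]
        ring
      · simp only [if_neg heq]
        rw [PySem.List.pyRange_one_eq_nil (by omega)]
        simp

lemma pvFloordivOne (a : Int) : PySem.Int.floordiv a 1 = a := by
  rw [PySem.Int.floordiv_eq_ediv_of_pos (by omega)]
  exact Int.ediv_one a

-- ===== B-side lemmas =====

-- r = isqrt(nb), the final value of B's loop counter
def pvR (nb : Int) : Int := ((nb.toNat.sqrt : Nat) : Int)

-- the summand of B's loop
def pvG (nb x : Int) : Int :=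
  x * PySem.Int.floordiv nb x + SigmaInvIntAltT (PySem.Int.floordiv nb x)

-- sum of T(nb//x) for x in [lo, hi]
def pvW (nb lo hi : Int) : Int :=
  ((PySem.List.pyRange lo (hi + 1) 1).map
    (fun x => SigmaInvIntAltT (PySem.Int.floordiv nb x))).sum

lemma pvTri2 (x : Int) : SigmaInvIntAltT x * 2 = x * (x + 1) := by
  obtain ⟨k, hk⟩ := Int.even_mul_succ_self x
  unfold SigmaInvIntAltT
  rw [hk, show k + k = k * 2 from by ring,
    PySem.Int.floordiv_eq_iff_of_pos (by omega) |>.mpr ⟨le_rfl, by omega⟩]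

-- sum of d over (a, b] equals T(b) - T(a)
lemma pvSumIoc (a b : Int) (hab : a ≤ b) :
    ((PySem.List.pyRange (a + 1) (b + 1) 1).map (fun d => d)).sum
      = SigmaInvIntAltT b - SigmaInvIntAltT a := by
  have hcast : b + 1 = (a + 1) + ((b - a).toNat : Int) := by omega
  have hg := pvGauss (b - a).toNat (a + 1)
  rw [← hcast] at hg
  have h2 : (SigmaInvIntAltT b - SigmaInvIntAltT a) * 2 = b * (b + 1) - a * (a + 1) := by
    rw [sub_mul, pvTri2, pvTri2]
  have hc : ((b - a).toNat : Int) = b - a := by omega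
  rw [hc] at hg
  nlinarith [hg, h2]

-- block sum: for nb//(i+1) ≤ lo ≤ nb//i, the sum of d*(nb//d) over (lo, nb//i] is i*(T(nb//i)-T(lo))
lemma pvBlockSum (nb i lo : Int) (hnb : 0 ≤ nb) (hi : 0 < i)
    (hlo : PySem.Int.floordiv nb (i + 1) ≤ lo) (hhi : lo ≤ PySem.Int.floordiv nb i) :
    ((PySem.List.pyRange (lo + 1) (PySem.Int.floordiv nb i + 1) 1).map (pvF nb)).sum
      = i * (SigmaInvIntAltT (PySem.Int.floordiv nb i) - SigmaInvIntAltT lo) := by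
  have hcongr : (PySem.List.pyRange (lo + 1) (PySem.Int.floordiv nb i + 1) 1).map (pvF nb)
      = (PySem.List.pyRange (lo + 1) (PySem.Int.floordiv nb i + 1) 1).map (fun d => d * i) := by
    apply List.map_congr_left
    intro d hd
    rw [PySem.List.mem_pyRange_one] at hd
    unfold pvF
    rw [pvBlockQuot nb i d hnb hi (by omega) (by omega)]
  have hconst : ((PySem.List.pyRange (lo + 1) (PySem.Int.floordiv nb i + 1) 1).map
        (fun d => d * i)).sum
      = ((PySem.List.pyRange (lo + 1) (PySem.Int.floordiv nb i + 1) 1).map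
        (fun d => d)).sum * i := by
    rw [← List.sum_map_mul_right]
  rw [hcongr, hconst, pvSumIoc lo (PySem.Int.floordiv nb i) hhi]
  ring

lemma pvFloordivLe (nb r : Int) (hnb : 0 ≤ nb) (hr : 1 ≤ r) :
    PySem.Int.floordiv nb r ≤ nb := by
  have h1 : PySem.Int.floordiv nb r * r ≤ nb :=
    (PySem.Int.le_floordiv_iff_mul_le (by omega)).mp le_rfl
  have h0 : 0 ≤ PySem.Int.floordiv nb r :=
    (PySem.Int.le_floordiv_iff_mul_le (by omega)).mpr (by omega)
  nlinarith

-- hyperbola invariant: sum_{a=1}^{r} T(nb//a) = sum_{d=nb//r+1}^{nb} d*(nb//d) + r*T(nb//r)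
lemma pvHyp (nb : Int) (hnb : 1 ≤ nb) :
    ∀ (k : Nat), pvW nb 1 ((k : Int) + 1)
      = pvT nb (PySem.Int.floordiv nb ((k : Int) + 1) + 1) nb
        + ((k : Int) + 1) * SigmaInvIntAltT (PySem.Int.floordiv nb ((k : Int) + 1)) := by
  intro k
  induction k with
  | zero =>
    simp only [Nat.cast_zero, zero_add]
    unfold pvW pvT
    rw [pvFloordivOne, PySem.List.pyRange_one_singleton,
      PySem.List.pyRange_one_eq_nil (le_refl (nb + 1))]
    simp
  | succ m ih =>
    have hr1 : (1:Int) ≤ (m : Int) + 1 := by omega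
    have hab : PySem.Int.floordiv nb ((m : Int) + 1 + 1) ≤ PySem.Int.floordiv nb ((m : Int) + 1) :=
      pvQuotAntitone nb ((m : Int) + 1) (by omega) (by omega)
    have hble : PySem.Int.floordiv nb ((m : Int) + 1) ≤ nb := pvFloordivLe nb _ (by omega) hr1
    -- left side gains T(nb//(m+2))
    have hW : pvW nb 1 ((m + 1 : Nat) + 1 : Int)
        = pvW nb 1 ((m : Int) + 1)
          + SigmaInvIntAltT (PySem.Int.floordiv nb ((m : Int) + 1 + 1)) := by
      unfold pvW
      rw [show ((m + 1 : Nat) : Int) + 1 + 1 = ((m : Int) + 1 + 1) + 1 from by push_cast; ring,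
        PySem.List.pyRange_one_succ_right (by omega)]
      simp [List.sum_append]
    -- split the tail at nb//(m+1)
    have hsplit : pvT nb (PySem.Int.floordiv nb ((m : Int) + 1 + 1) + 1) nb
        = ((PySem.List.pyRange (PySem.Int.floordiv nb ((m : Int) + 1 + 1) + 1)
              (PySem.Int.floordiv nb ((m : Int) + 1) + 1) 1).map (pvF nb)).sum
          + pvT nb (PySem.Int.floordiv nb ((m : Int) + 1) + 1) nb := by
      unfold pvT
      rw [← List.sum_append, ← List.map_append,
        ← PySem.List.pyRange_one_append (PySem.Int.floordiv nb ((m : Int) + 1 + 1) + 1)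
            (PySem.Int.floordiv nb ((m : Int) + 1) + 1) (nb + 1) (by omega) (by omega)]
    have hblk := pvBlockSum nb ((m : Int) + 1) (PySem.Int.floordiv nb ((m : Int) + 1 + 1))
      (by omega) (by omega) le_rfl hab
    rw [hW, ih]
    rw [show ((m + 1 : Nat) : Int) + 1 = (m : Int) + 1 + 1 from by push_cast; ring]
    rw [hsplit, hblk]
    ring

-- basic square-root bracketing for pvR
lemma pvRsq (nb : Int) (hnb : 0 ≤ nb) :
    pvR nb * pvR nb ≤ nb ∧ nb < (pvR nb + 1) * (pvR nb + 1) := by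
  unfold pvR
  constructor
  · have h := Nat.sqrt_le' nb.toNat
    have h2 : ((nb.toNat.sqrt : Nat) : Int) ^ 2 ≤ ((nb.toNat : Nat) : Int) := by exact_mod_cast h
    rw [pow_two] at h2
    have h3 : ((nb.toNat : Nat) : Int) = nb := by omega
    nlinarith [h2]
  · have h := Nat.lt_succ_sqrt' nb.toNat
    have h2 : ((nb.toNat : Nat) : Int) < ((nb.toNat.sqrt.succ : Nat) : Int) ^ 2 := by
      exact_mod_cast h
    rw [pow_two] at h2
    have h3 : ((nb.toNat : Nat) : Int) = nb := by omega
    nlinarith [h2]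

-- B's loop computes sum_{x=a+1}^{r} (x*(nb//x) + T(nb//x)) and stops at a = r
lemma pvLoopB (nb : Int) (hnb : 1 ≤ nb) :
    ∀ (fuel : Nat) (a S : Int), 0 ≤ a → a ≤ pvR nb → (pvR nb - a).toNat < fuel →
      SigmaInvIntAltLoop fuel nb S a
        = (S + ((PySem.List.pyRange (a + 1) (pvR nb + 1) 1).map (pvG nb)).sum, pvR nb) := by
  obtain ⟨hr1, hr2⟩ := pvRsq nb (by omega)
  intro fuel
  induction fuel with
  | zero => intro a S _ _ hf; omega
  | succ m ih =>
    intro a S ha har hf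
    by_cases hgd : (a + 1) * (a + 1) ≤ nb
    · have halt : a < pvR nb := by nlinarith
      have hstep : SigmaInvIntAltLoop (m + 1) nb S a
          = SigmaInvIntAltLoop m nb
              (S + ((a + 1) * PySem.Int.floordiv nb (a + 1)
                + SigmaInvIntAltT (PySem.Int.floordiv nb (a + 1)))) (a + 1) := by
        simp only [SigmaInvIntAltLoop, if_pos hgd]
      rw [hstep, ih (a + 1) _ (by omega) (by omega) (by omega)]
      rw [show PySem.List.pyRange (a + 1) (pvR nb + 1) 1
            = (a + 1) :: PySem.List.pyRange (a + 1 + 1) (pvR nb + 1) 1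
          from PySem.List.pyRange_one_cons (by omega)]
      simp only [List.map_cons, List.sum_cons]
      unfold pvG
      ring_nf
    · have haeq : a = pvR nb := by
        by_contra hne
        have : a + 1 ≤ pvR nb := by omega
        nlinarith
      have hstop : SigmaInvIntAltLoop (m + 1) nb S a = (S, a) := by
        simp only [SigmaInvIntAltLoop, if_neg hgd]
      rw [hstop, haeq, PySem.List.pyRange_one_eq_nil (by omega)]
      simp

-- B equals the direct sum sum_{d=1}^{nb} d*(nb//d)
lemma pvB_eq (nb : Int) : SigmaInvInt_alt nb = pvT nb 1 nb := by
  by_cases hnb : 1 ≤ nb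
  · obtain ⟨hr1, hr2⟩ := pvRsq nb (by omega)
    have hrpos : 1 ≤ pvR nb := by nlinarith
    have hrle : pvR nb ≤ nb := by nlinarith
    have hq : pvR nb ≤ PySem.Int.floordiv nb (pvR nb) :=
      (PySem.Int.le_floordiv_iff_mul_le (by omega)).mpr (by nlinarith)
    have hq2 : PySem.Int.floordiv nb (pvR nb + 1) ≤ pvR nb := by
      have := (PySem.Int.floordiv_lt_iff_lt_mul
        (show (0:Int) < pvR nb + 1 by omega) (a := nb) (q := pvR nb + 1)).mpr (by nlinarith)
      omega
    have hble : PySem.Int.floordiv nb (pvR nb) ≤ nb := pvFloordivLe nb _ (by omega) hrpos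
    unfold SigmaInvInt_alt
    rw [pvLoopB nb hnb (nb.toNat + 1) 0 0 le_rfl (by omega) (by omega)]
    simp only [zero_add]
    -- split the loop sum into the d-part and the T-part
    have hgsum : ((PySem.List.pyRange 1 (pvR nb + 1) 1).map (pvG nb)).sum
        = pvT nb 1 (pvR nb) + pvW nb 1 (pvR nb) := by
      have hg1 : (PySem.List.pyRange 1 (pvR nb + 1) 1).map (pvG nb)
          = (PySem.List.pyRange 1 (pvR nb + 1) 1).map
              (fun x => pvF nb x + SigmaInvIntAltT (PySem.Int.floordiv nb x)) := by
        apply List.map_congr_left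
        intro x _
        simp [pvG, pvF]
      rw [hg1]
      simp only [pvT, pvW]
      rw [PySem.List.sum_map_add_int]
    rw [hgsum]
    -- hyperbola identity at r = pvR nb
    have hhyp := pvHyp nb hnb (pvR nb - 1).toNat
    rw [show ((pvR nb - 1).toNat : Int) + 1 = pvR nb from by omega] at hhyp
    -- tail from r+1 splits at nb//r; the middle block has constant quotient r
    have hmid := pvBlockSum nb (pvR nb) (pvR nb) (by omega) (by omega) hq2 hq
    have hsplit2 : pvT nb (pvR nb + 1) nb
        = ((PySem.List.pyRange (pvR nb + 1) (PySem.Int.floordiv nb (pvR nb) + 1) 1).map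
            (pvF nb)).sum
          + pvT nb (PySem.Int.floordiv nb (pvR nb) + 1) nb := by
      unfold pvT
      rw [← List.sum_append, ← List.map_append,
        ← PySem.List.pyRange_one_append (pvR nb + 1)
            (PySem.Int.floordiv nb (pvR nb) + 1) (nb + 1) (by omega) (by omega)]
    have hwhole : pvT nb 1 nb = pvT nb 1 (pvR nb) + pvT nb (pvR nb + 1) nb := by
      unfold pvT
      rw [← List.sum_append, ← List.map_append,
        ← PySem.List.pyRange_one_append 1 (pvR nb + 1) (nb + 1) (by omega) (by omega)]
    rw [hwhole, hsplit2, hmid, hhyp]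
    ring
  · -- nb ≤ 0: B's loop never runs and the sum is empty
    unfold SigmaInvInt_alt
    have h0 : nb.toNat = 0 := by omega
    rw [h0]
    simp only [SigmaInvIntAltLoop, if_neg (show ¬ (0 + 1) * (0 + 1) ≤ nb by omega)]
    unfold pvT SigmaInvIntAltT
    rw [PySem.List.pyRange_one_eq_nil (by omega)]
    simp [PySem.Int.floordiv]

-- A equals the direct sum as well
lemma pvA_eq (nb : Int) : SigmaInvInt nb = pvT nb 1 nb := by
  by_cases hnb : 1 ≤ nb
  · have h := pvLoopA nb hnb (nb.toNat + 1) 1 0 (by omega) (by omega)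
      (by rw [pvFloordivOne]; omega)
    unfold SigmaInvInt
    rw [show (PySem.Int.floordiv nb 1) = nb from pvFloordivOne nb] at h
    rw [h]
    ring
  · unfold SigmaInvInt
    have h0 : nb.toNat = 0 := by omega
    rw [h0]
    simp only [SigmaInvIntLoop, if_neg (show ¬ (1:Int) < nb by omega)]
    unfold SigmaInvIntFinish pvT
    rw [PySem.List.pyRange_one_eq_nil (by omega)]
    simp
    omega

-- ===== VERDICT (by name: the statement is the Claim_ definition above) =====
theorem SigmaInvInt_spec : Claim_equal_SigmaInvInt := by
  intro nb _
  unfold Spec_SigmaInvInt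
  rw [pvA_eq, pvB_eq]
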